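-- pv_equiv track=rewrite | github.com/qja1998/algo-study-manager | BE/features/baekjoon.py | _tier_to_solvedac_format
-- ===== SOURCE A (Python) =====
-- def _tier_to_solvedac_format(tier: int) -> str:
--     """
--     백준 tier(1~30)를 solved.ac 쿼리 형식으로 변환합니다.
--
--     예: 1 -> b5, 11 -> g5, 30 -> r1
--     """
--     if tier < 1 or tier > 30:
--         raise ValueError("tier must be between 1 and 30")
--
--     groups = [
--         ("b", 1),  # Bronze
--         ("s", 6),  # Silver
--         ("g", 11),  # Gold
--         ("p", 16),  # Platinum
--         ("d", 21),  # Diamond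
--         ("r", 26),  # Ruby
--     ]
--
--     for prefix, start in groups:
--         if start <= tier <= start + 4:
--             offset = tier - start  # 0..4
--             level = 5 - offset  # 5..1
--             return f"{prefix}{level}"
--
--     # unreachable
--     raise ValueError("invalid tier")
-- ===== SOURCE B (Python) =====
-- def _tier_to_solvedac_format(tier: int) -> str:
--     if tier < 1 or tier > 30:
--         raise ValueError("tier must be between 1 and 30")
--     idx = tier - 1
--     return f"{'bsgpdr'[idx // 5]}{5 - idx % 5}"
-- ===== Notes on version B (the rewrite author's own statement) =====
-- stated objective: simpler
-- what changed: Replaces the six-entry groups table and its membership-test loop with direct index arithmetic into the prefix string 'bsgpdr'.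
import Mathlib
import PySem

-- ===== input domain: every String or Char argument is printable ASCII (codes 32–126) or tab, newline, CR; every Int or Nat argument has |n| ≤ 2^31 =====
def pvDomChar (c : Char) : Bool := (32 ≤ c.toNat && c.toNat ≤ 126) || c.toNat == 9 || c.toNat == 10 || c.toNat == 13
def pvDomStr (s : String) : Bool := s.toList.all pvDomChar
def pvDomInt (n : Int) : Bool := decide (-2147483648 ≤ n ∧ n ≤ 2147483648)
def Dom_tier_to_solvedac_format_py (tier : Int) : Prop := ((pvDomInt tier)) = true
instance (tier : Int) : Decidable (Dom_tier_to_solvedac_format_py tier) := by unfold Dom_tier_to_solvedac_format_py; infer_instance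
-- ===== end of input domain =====

-- B replaces the groups table and membership-test loop with direct arithmetic on (tier-1).
-- ===== PORT A =====
-- loop over the groups list, returning on the first matching range (unreachable fallback omitted as Pre_ excludes it)
def pvGroups : List (String × Int) :=
  [("b", 1), ("s", 6), ("g", 11), ("p", 16), ("d", 21), ("r", 26)]

def pvFindGroup : List (String × Int) → Int → Option String
  | [], _ => none
  | (prefix_, start) :: rest, tier =>
    if start ≤ tier ∧ tier ≤ start + 4 then
      some (prefix_ ++ PySem.Int.toStr (5 - (tier - start)))
    else pvFindGroup rest tier

def tier_to_solvedac_format_py (tier : Int) : String :=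
  if tier < 1 ∨ tier > 30 then ""   -- ValueError; excluded by Pre_
  else (pvFindGroup pvGroups tier).getD ""   -- second raise is unreachable under Pre_

-- ===== PORT B =====
def tier_to_solvedac_format_py_alt (tier : Int) : String :=
  if tier < 1 ∨ tier > 30 then ""   -- ValueError; excluded by Pre_
  else
    let idx := tier - 1
    (((PySem.Str.pyGet? "bsgpdr" (PySem.Int.floordiv idx 5)).map String.singleton).getD "") ++
      PySem.Int.toStr (5 - PySem.Int.mod idx 5)

-- ===== PRECONDITION & SPEC =====
-- Pre_ excludes exactly the inputs on which A raises ValueError.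
def Pre_tier_to_solvedac_format_py (tier : Int) : Prop := 1 ≤ tier ∧ tier ≤ 30
instance (tier : Int) : Decidable (Pre_tier_to_solvedac_format_py tier) := by
  unfold Pre_tier_to_solvedac_format_py; infer_instance
def pvWitness_tier_to_solvedac_format_py : Int := 11

def Spec_tier_to_solvedac_format_py (tier : Int) (out : String) : Prop := out = tier_to_solvedac_format_py_alt tier
instance (tier : Int) (out : String) : Decidable (Spec_tier_to_solvedac_format_py tier out) := by unfold Spec_tier_to_solvedac_format_py; infer_instance

-- ===== CLAIM (what is proved, stated in full; the proofs are below) =====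
def Claim_equal_tier_to_solvedac_format_py : Prop := ∀ (tier : Int), Dom_tier_to_solvedac_format_py tier → Pre_tier_to_solvedac_format_py tier → Spec_tier_to_solvedac_format_py tier (tier_to_solvedac_format_py tier)

-- ===== LEMMAS AND PROOFS =====

-- ===== VERDICT (by name: the statement is the Claim_ definition above) =====
theorem tier_to_solvedac_format_py_spec : Claim_equal_tier_to_solvedac_format_py := by
  intro tier _ hpre
  obtain ⟨h1, h2⟩ := hpre
  unfold Spec_tier_to_solvedac_format_py
  interval_cases tier <;> decide
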